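-- pv_equiv track=rewrite | github.com/vijayjayanandan/claraity-code | src/tools/powershell_sanitize.py | _replace_outside_quotes
-- ===== SOURCE A (Python) =====
-- def _replace_outside_quotes(text: str, old: str, new: str) -> str:
--     """Replace `old` with `new` only in unquoted portions of text.
--
--     Respects both single and double quotes. Handles escaped quotes minimally
--     (good enough for shell commands, not a full parser).
--     """
--     parts = []
--     i = 0
--     length = len(text)
--
--     while i < length:
--         # Check for quote start
--         if text[i] in ('"', "'"):
--             quote_char = text[i]
--             # Find the matching close quote
--             j = i + 1
--             while j < length and text[j] != quote_char:
--                 if text[j] == "\\" and j + 1 < length: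
--                     j += 1  # skip escaped char
--                 j += 1
--             if j < length:
--                 j += 1  # include closing quote
--             parts.append(text[i:j])
--             i = j
--         else:
--             # Unquoted segment - find next quote or end
--             j = i
--             while j < length and text[j] not in ('"', "'"):
--                 j += 1
--             segment = text[i:j]
--             parts.append(segment.replace(old, new))
--             i = j
--
--     return "".join(parts)
-- ===== SOURCE B (Python) =====
-- def _replace_outside_quotes(text: str, old: str, new: str) -> str:
--     """Single state-machine pass: buffer unquoted chars, flush them through
--     .replace at each quote boundary; quoted chars (with backslash-escapes) pass
--     through verbatim."""
--     out = []
--     buf = []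
--     quote = None
--     skip = False
--     for ch in text:
--         if quote is None:
--             if ch in ('"', "'"):
--                 if buf:
--                     out.append("".join(buf).replace(old, new))
--                     buf = []
--                 quote = ch
--                 out.append(ch)
--             else:
--                 buf.append(ch)
--         else:
--             out.append(ch)
--             if skip:
--                 skip = False
--             elif ch == "\\":
--                 skip = True
--             elif ch == quote:
--                 quote = None
--     if buf:
--         out.append("".join(buf).replace(old, new))
--     return "".join(out)
-- ===== Notes on version B (the rewrite author's own statement) =====
-- stated objective: alternative
-- what changed: A finds quoted/unquoted segments with nested index scans and slicing; B is one uniform per-character state machine (open-quote char + backslash-skip flag + unquoted buffer flushed through .replace at quote boundaries and at the end).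
import Mathlib
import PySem

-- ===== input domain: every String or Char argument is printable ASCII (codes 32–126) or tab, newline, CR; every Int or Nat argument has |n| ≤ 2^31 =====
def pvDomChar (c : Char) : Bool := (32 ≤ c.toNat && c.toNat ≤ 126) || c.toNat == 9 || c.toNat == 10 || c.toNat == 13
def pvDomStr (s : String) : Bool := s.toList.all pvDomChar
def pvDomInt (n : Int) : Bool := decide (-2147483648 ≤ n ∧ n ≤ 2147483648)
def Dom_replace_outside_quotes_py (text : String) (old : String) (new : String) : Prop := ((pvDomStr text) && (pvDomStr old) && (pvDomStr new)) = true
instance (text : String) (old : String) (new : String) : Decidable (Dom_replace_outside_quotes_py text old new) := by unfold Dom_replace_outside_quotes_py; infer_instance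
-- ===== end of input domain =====

-- B replaces A's nested find-next-quote/find-next-segment index scans with one uniform
-- per-character state-machine pass (open-quote state + unquoted buffer); alternative, not faster.

-- ===== PORT A =====

-- inner while loop: scan for the matching close quote, skipping backslash-escaped chars;
-- returns (chars scanned over, remainder starting at the close quote, or [] if unterminated)
def pvScanQuoted (q : Char) : List Char → List Char × List Char
  | [] => ([], [])
  | c :: rest =>
    if c = q then ([], c :: rest)
    else if c = '\\' then
      match rest with
      | [] => ([c], [])
      | d :: rest' =>
        let p := pvScanQuoted q rest'
        (c :: d :: p.1, p.2)
    else
      let p := pvScanQuoted q rest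
      (c :: p.1, p.2)

-- inner while loop: scan the unquoted segment up to the next quote or end
def pvScanPlain : List Char → List Char × List Char
  | [] => ([], [])
  | c :: rest =>
    if c = '"' ∨ c = '\'' then ([], c :: rest)
    else
      let p := pvScanPlain rest
      (c :: p.1, p.2)

theorem pvScanQuoted_len (q : Char) : (l : List Char) → (pvScanQuoted q l).2.length ≤ l.length
  | [] => by simp [pvScanQuoted]
  | c :: rest => by
    rw [pvScanQuoted.eq_def]
    by_cases h1 : c = q
    · subst h1; simp
    · by_cases h2 : c = '\\'
      · subst h2
        match rest with
        | [] => simp [h1]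
        | d :: rest' =>
          have := pvScanQuoted_len q rest'
          simp [h1]; omega
      · have := pvScanQuoted_len q rest
        simp [h1, h2]; omega
  termination_by l => l.length

theorem pvScanPlain_len (l : List Char) : (pvScanPlain l).2.length ≤ l.length := by
  induction l with
  | nil => simp [pvScanPlain]
  | cons c rest ih =>
    by_cases h : c = '"' ∨ c = '\'' <;> simp [pvScanPlain, h] <;> omega

-- the outer while loop of A, as recursion on the remaining character list
def pvLoopA (old new : String) : List Char → List Char
  | [] => []
  | c :: rest =>
    if h : c = '"' ∨ c = '\'' then
      -- quoted branch: scan for the close quote, include it if present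
      let p := pvScanQuoted c rest
      match hp : p.2 with
      | [] => c :: p.1
      | qc :: r' =>
        have : r'.length < rest.length + 1 := by
          have := pvScanQuoted_len c rest
          rw [show (pvScanQuoted c rest).2 = qc :: r' from hp] at this
          simp at this; omega
        c :: p.1 ++ qc :: pvLoopA old new r'
    else
      -- unquoted branch: segment up to the next quote, replaced
      let p := pvScanPlain (c :: rest)
      have : p.2.length ≤ rest.length := by
        have h2 := pvScanPlain_len rest
        simp only [p, pvScanPlain, h, if_false]
        exact h2
      (PySem.Str.replace (String.mk p.1) old new).toList ++ pvLoopA old new p.2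
  termination_by l => l.length

def replace_outside_quotes_py (text : String) (old : String) (new : String) : String :=
  String.mk (pvLoopA old new text.toList)

-- ===== PORT B =====

-- flush of the unquoted buffer: `if buf: out.append("".join(buf).replace(old,new))`
def pvFlush (old new : String) (buf : List Char) : List Char :=
  if buf = [] then [] else (PySem.Str.replace (String.mk buf) old new).toList

mutual
-- B's for loop, quote = None: accumulate unquoted chars in buf, flush at a quote / at the end
def pvLoopB (old new : String) : List Char → List Char → List Char
  | [], buf => pvFlush old new buf
  | c :: rest, buf =>
    if c = '"' ∨ c = '\'' then
      pvFlush old new buf ++ c :: pvInQ old new c false rest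
    else
      pvLoopB old new rest (buf ++ [c])
  termination_by l _ => l.length

-- B's for loop, inside a quote `q` with the backslash skip flag: chars pass through verbatim
def pvInQ (old new : String) (q : Char) (skip : Bool) : List Char → List Char
  | [] => []
  | c :: rest =>
    c ::
      (if skip then pvInQ old new q false rest
       else if c = '\\' then pvInQ old new q true rest
       else if c = q then pvLoopB old new rest []
       else pvInQ old new q false rest)
  termination_by l => l.length
end

def replace_outside_quotes_py_alt (text : String) (old : String) (new : String) : String :=
  String.mk (pvLoopB old new text.toList [])

-- ===== PRECONDITION & SPEC =====
def Spec_replace_outside_quotes_py (text : String) (old : String) (new : String) (out : String) : Prop := out = replace_outside_quotes_py_alt text old new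
instance (text : String) (old : String) (new : String) (out : String) : Decidable (Spec_replace_outside_quotes_py text old new out) := by unfold Spec_replace_outside_quotes_py; infer_instance

-- ===== CLAIM (what is proved, stated in full; the proofs are below) =====
def Claim_equal_replace_outside_quotes_py : Prop := ∀ (text : String) (old : String) (new : String), Dom_replace_outside_quotes_py text old new → Spec_replace_outside_quotes_py text old new (replace_outside_quotes_py text old new)

-- ===== LEMMAS AND PROOFS =====

-- A's loop, one step: the head plain segment (possibly empty) gets replaced, then the rest
theorem pvLoopA_plain (old new : String) (l : List Char) :
    pvLoopA old new l =
      pvFlush old new (pvScanPlain l).1 ++ pvLoopA old new (pvScanPlain l).2 := by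
  match l with
  | [] => simp [pvLoopA, pvScanPlain, pvFlush]
  | c :: rest =>
    by_cases h : c = '"' ∨ c = '\''
    · rw [pvScanPlain.eq_def]; simp [h, pvFlush]
    · rw [pvLoopA.eq_def, pvScanPlain.eq_def]
      simp only [h, if_false, dite_false]
      rw [pvScanPlain.eq_def]
      simp [h, pvFlush]

-- the joint loop invariant: B's two modes against A's two inner scans
theorem pvMain (old new : String) : ∀ (n : ℕ) (l : List Char), l.length ≤ n →
    (∀ buf, pvLoopB old new l buf =
        pvFlush old new (buf ++ (pvScanPlain l).1) ++ pvLoopA old new (pvScanPlain l).2)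
    ∧ (∀ q, q ≠ '\\' → pvInQ old new q false l =
        (pvScanQuoted q l).1 ++
          (match (pvScanQuoted q l).2 with
           | [] => []
           | qc :: r' => qc :: pvLoopA old new r')) := by
  intro n
  induction n with
  | zero =>
    intro l hl
    have : l = [] := List.eq_nil_of_length_eq_zero (Nat.le_zero.mp hl)
    subst this
    constructor
    · intro buf; simp [pvLoopB, pvScanPlain, pvLoopA]
    · intro q hq; simp [pvInQ, pvScanQuoted]
  | succ n ih =>
    intro l hl
    match l with
    | [] =>
      constructor
      · intro buf; simp [pvLoopB, pvScanPlain, pvLoopA]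
      · intro q hq; simp [pvInQ, pvScanQuoted]
    | c :: rest =>
      have hr : rest.length ≤ n := by simp at hl; omega
      constructor
      · intro buf
        by_cases h : c = '"' ∨ c = '\''
        · -- quote head: flush, emit the quote, switch to in-quote mode
          rw [pvLoopB.eq_def, pvScanPlain.eq_def]
          simp only [h, if_true, ite_true]
          have hq : c ≠ '\\' := by rcases h with h | h <;> subst h <;> decide
          rw [(ih rest hr).2 c hq]
          rw [pvLoopA.eq_def]
          simp only [h, dite_true]
          match hp : (pvScanQuoted c rest).2 with
          | [] => simp [hp]
          | qc :: r' => simp [hp]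
        · -- plain head: accumulate into buf
          rw [pvLoopB.eq_def, pvScanPlain.eq_def]
          simp only [h, if_false, ite_false]
          rw [(ih rest hr).1 (buf ++ [c])]
          simp
      · intro q hq
        by_cases h1 : c = q
        · -- close quote: back to plain mode with empty buffer
          subst h1
          rw [pvInQ.eq_def, pvScanQuoted.eq_def]
          simp only [if_pos rfl, Bool.false_eq_true, if_false]
          have hcb : c ≠ '\\' := hq
          simp only [hcb, if_false, if_pos rfl]
          rw [(ih rest hr).1 [], List.nil_append, ← pvLoopA_plain]
          simp
        · by_cases h2 : c = '\\'
          · -- escape: emit the backslash and the next char verbatim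
            subst h2
            match rest with
            | [] =>
              rw [pvInQ.eq_def, pvScanQuoted.eq_def]
              simp [h1, pvInQ]
            | d :: rest' =>
              have hr' : rest'.length ≤ n := by simp at hl; omega
              rw [pvInQ.eq_def, pvScanQuoted.eq_def]
              simp only [h1, if_false, Bool.false_eq_true, if_pos rfl, ite_false]
              rw [pvInQ.eq_def]
              simp only []
              rw [(ih rest' hr').2 q hq]
              match hp : (pvScanQuoted q rest').2 with
              | [] => simp [hp, h1]
              | qc :: r' => simp [hp, h1]
          · -- ordinary quoted char: emit verbatim
            rw [pvInQ.eq_def, pvScanQuoted.eq_def]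
            simp only [h1, h2, if_false, Bool.false_eq_true, ite_false]
            rw [(ih rest hr).2 q hq]
            match hp : (pvScanQuoted q rest).2 with
            | [] => simp [hp, h1, h2]
            | qc :: r' => simp [hp, h1, h2]

-- at the top level both loops agree (B starts with an empty buffer)
theorem pvLoopB_eq_pvLoopA (old new : String) (l : List Char) :
    pvLoopB old new l [] = pvLoopA old new l := by
  rw [(pvMain old new l.length l le_rfl).1 [], List.nil_append, ← pvLoopA_plain]

-- ===== VERDICT (by name: the statement is the Claim_ definition above) =====
theorem replace_outside_quotes_py_spec : Claim_equal_replace_outside_quotes_py := by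
  intro text old new _
  unfold Spec_replace_outside_quotes_py replace_outside_quotes_py replace_outside_quotes_py_alt
  rw [pvLoopB_eq_pvLoopA]
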